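-- pv_equiv track=rewrite | github.com/MalakaVoid/ModelingSystemsLabs | lab4.py | get_programs_time_in_buffer
-- ===== SOURCE A (Python) =====
-- def get_programs_time_in_buffer(arrival_times, proccesing_times):
--     #Рассчитываем время начала обработки программы сервером
--     all_time_of_start_computing = []
--     time_of_start_computing = arrival_times[0]
--
--     for i in range(0, len(arrival_times)):
--         if time_of_start_computing < arrival_times[i]:
--             all_time_of_start_computing.append(arrival_times[i])
--             time_of_start_computing = arrival_times[i] + proccesing_times[i]
--         else:
--             all_time_of_start_computing.append(time_of_start_computing)
--             time_of_start_computing += proccesing_times[i]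
--
--     #Рассчитываем время нахождение в буфере
--     time_in_buffer_each = []
--     time_in_buffer = 0
--     for i in range(0, len(arrival_times)):
--         time_in_buffer = all_time_of_start_computing[i] - arrival_times[i]
--         time_in_buffer_each.append(time_in_buffer)
--     return time_in_buffer_each
-- ===== SOURCE B (Python) =====
-- def get_programs_time_in_buffer(arrival_times, proccesing_times):
--     # Closed-form: wait_i = peak_i + busy_i - a_i, where busy_i = p_0 + ... + p_{i-1}
--     # (prefix sums of processing times) and peak_i = max_{j <= i} (a_j - busy_j).
--     # Correct because start_i = busy_i + max_{j <= i}(a_j - busy_j) solves the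
--     # recurrence start_i = max(start_{i-1} + p_{i-1}, a_i) with start_0 = a_0.
--     n = len(arrival_times)
--     busy = [0]
--     for i in range(1, n):
--         busy.append(busy[-1] + proccesing_times[i - 1])
--     slack = [arrival_times[i] - busy[i] for i in range(n)]
--     peak = slack[:1]
--     for c in slack[1:]:
--         peak.append(max(peak[-1], c))
--     return [peak[i] + busy[i] - arrival_times[i] for i in range(n)]
-- ===== Notes on version B (the rewrite author's own statement) =====
-- stated objective: alternative
-- what changed: Replaces A's sequential schedule simulation (threading a start-time accumulator through branches) with a closed-form computation: prefix sums of processing times plus a running maximum of the slacks a_j - busy_j, from which each wait is read off as peak_i + busy_i - a_i.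
import Mathlib
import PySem

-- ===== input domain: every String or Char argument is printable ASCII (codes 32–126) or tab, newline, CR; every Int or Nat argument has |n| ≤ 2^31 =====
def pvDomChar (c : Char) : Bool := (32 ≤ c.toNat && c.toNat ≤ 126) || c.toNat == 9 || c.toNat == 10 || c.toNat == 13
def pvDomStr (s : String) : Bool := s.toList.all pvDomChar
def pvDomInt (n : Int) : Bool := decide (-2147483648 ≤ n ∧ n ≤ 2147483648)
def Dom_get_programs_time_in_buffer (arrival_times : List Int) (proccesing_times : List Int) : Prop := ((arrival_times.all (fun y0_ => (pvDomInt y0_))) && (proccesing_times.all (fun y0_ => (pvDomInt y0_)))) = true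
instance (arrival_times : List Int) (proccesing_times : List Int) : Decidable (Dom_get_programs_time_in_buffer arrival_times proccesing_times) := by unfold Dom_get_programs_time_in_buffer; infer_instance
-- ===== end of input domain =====

-- B replaces A's simulated schedule with a closed form (prefix sums of processing times plus a
-- running maximum of slacks): objective = alternative algorithm, same asymptotic cost.


-- ===== PORT A =====
-- literal transliteration of A: first loop builds the list of start-of-processing times
-- while threading time_of_start_computing; second loop subtracts the arrival times.
def get_programs_time_in_buffer (arrival_times : List Int) (proccesing_times : List Int) : List Int :=
  let n : Int := (arrival_times.length : Int)
  let r :=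
    (PySem.List.pyRange 0 n 1).foldl
      (fun (st : List Int × Int) i =>
        let ai := PySem.List.pyGetD arrival_times i 0
        if st.2 < ai then
          (st.1 ++ [ai], ai + PySem.List.pyGetD proccesing_times i 0)
        else
          (st.1 ++ [st.2], st.2 + PySem.List.pyGetD proccesing_times i 0))
      ([], PySem.List.pyGetD arrival_times 0 0)
  let all_time_of_start_computing := r.1
  (PySem.List.pyRange 0 n 1).foldl
    (fun acc i =>
      acc ++ [PySem.List.pyGetD all_time_of_start_computing i 0 - PySem.List.pyGetD arrival_times i 0])
    []

-- ===== PORT B =====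
-- literal transliteration of B: busy = prefix sums of processing times (append loop reading busy[-1]),
-- slack[i] = a[i] - busy[i], peak = running maxima of slack, result[i] = peak[i] + busy[i] - a[i].
def get_programs_time_in_buffer_alt (arrival_times : List Int) (proccesing_times : List Int) : List Int :=
  let n : Int := (arrival_times.length : Int)
  let busy := (PySem.List.pyRange 1 n 1).foldl
    (fun bb i => bb ++ [PySem.List.pyGetD bb (-1) 0 + PySem.List.pyGetD proccesing_times (i - 1) 0]) [0]
  let slack := (PySem.List.pyRange 0 n 1).map
    (fun i => PySem.List.pyGetD arrival_times i 0 - PySem.List.pyGetD busy i 0)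
  let peak := (PySem.List.slice slack (some 1) none).foldl
    (fun pk c => pk ++ [max (PySem.List.pyGetD pk (-1) 0) c]) (PySem.List.slice slack none (some 1))
  (PySem.List.pyRange 0 n 1).map
    (fun i => PySem.List.pyGetD peak i 0 + PySem.List.pyGetD busy i 0 - PySem.List.pyGetD arrival_times i 0)

-- ===== PRECONDITION & SPEC =====
-- A raises IndexError on an empty arrival list (arrival_times[0]) and when
-- proccesing_times is shorter than arrival_times (proccesing_times[i] in the first loop).
def Pre_get_programs_time_in_buffer (arrival_times : List Int) (proccesing_times : List Int) : Prop :=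
  arrival_times ≠ [] ∧ arrival_times.length ≤ proccesing_times.length
instance (arrival_times : List Int) (proccesing_times : List Int) : Decidable (Pre_get_programs_time_in_buffer arrival_times proccesing_times) := by unfold Pre_get_programs_time_in_buffer; infer_instance

def pvWitness_get_programs_time_in_buffer : List Int × List Int := ([0, 2, 3], [4, 1, 2])

def Spec_get_programs_time_in_buffer (arrival_times : List Int) (proccesing_times : List Int) (out : List Int) : Prop := out = get_programs_time_in_buffer_alt arrival_times proccesing_times
instance (arrival_times : List Int) (proccesing_times : List Int) (out : List Int) : Decidable (Spec_get_programs_time_in_buffer arrival_times proccesing_times out) := by unfold Spec_get_programs_time_in_buffer; infer_instance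

-- ===== CLAIM (what is proved, stated in full; the proofs are below) =====
def Claim_equal_get_programs_time_in_buffer : Prop := ∀ (arrival_times : List Int) (proccesing_times : List Int), Dom_get_programs_time_in_buffer arrival_times proccesing_times → Pre_get_programs_time_in_buffer arrival_times proccesing_times → Spec_get_programs_time_in_buffer arrival_times proccesing_times (get_programs_time_in_buffer arrival_times proccesing_times)

-- ===== LEMMAS AND PROOFS =====

-- A-side: the start-times list A's first loop produces, expressed on the zipped list
def pvStarts (t : Int) : List (Int × Int) → List Int
  | [] => []
  | (a, p) :: rest => max t a :: pvStarts (max t a + p) rest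

theorem pvStarts_length (t : Int) (l : List (Int × Int)) : (pvStarts t l).length = l.length := by
  induction l generalizing t with
  | nil => rfl
  | cons hd tl ih => cases hd; simp [pvStarts, ih]

theorem pvFoldA_fst (l : List (Int × Int)) (acc : List Int) (t : Int) :
    (l.foldl (fun (st : List Int × Int) z =>
        if st.2 < z.1 then (st.1 ++ [z.1], z.1 + z.2) else (st.1 ++ [st.2], st.2 + z.2))
      (acc, t)).1 = acc ++ pvStarts t l := by
  induction l generalizing acc t with
  | nil => simp [pvStarts]
  | cons hd tl ih =>
    cases hd with
    | mk a p =>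
      by_cases h : t < a
      · simp [pvStarts, List.foldl_cons, h, ih, max_eq_right (le_of_lt h)]
      · simp [pvStarts, List.foldl_cons, h, ih, max_eq_left (le_of_not_gt h)]

-- the index map over range(len a) reading a[i], p[i] is exactly zip a p
theorem pvMap_range_zip (a p : List Int) (h : a.length ≤ p.length) :
    (PySem.List.pyRange 0 (a.length : Int) 1).map
      (fun i => (PySem.List.pyGetD a i 0, PySem.List.pyGetD p i 0)) = a.zip p := by
  apply List.ext_getElem
  · simp [PySem.List.length_pyRange_one, h]
  · intro k h1 h2
    have hk : k < a.length := by
      simpa [PySem.List.length_pyRange_one] using h1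
    simp [PySem.List.getElem_pyRange_one, PySem.List.pyGetD_natCast,
      List.getD_eq_getElem?_getD, List.getElem?_eq_getElem hk,
      List.getElem?_eq_getElem (lt_of_lt_of_le hk h)]

-- A's port reduces to start-times minus arrivals
theorem pvA_eq_zipWith (a p : List Int) (hne : a ≠ []) (hlen : a.length ≤ p.length) :
    get_programs_time_in_buffer a p
      = List.zipWith (· - ·) (pvStarts (a.headI) (a.zip p)) a := by
  obtain ⟨a0, rest, rfl⟩ := List.exists_cons_of_ne_nil hne
  unfold get_programs_time_in_buffer
  simp only []
  have hfold :
      ((PySem.List.pyRange 0 ((a0 :: rest).length : Int) 1).foldl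
        (fun (st : List Int × Int) i =>
          if st.2 < PySem.List.pyGetD (a0 :: rest) i 0 then
            (st.1 ++ [PySem.List.pyGetD (a0 :: rest) i 0],
              PySem.List.pyGetD (a0 :: rest) i 0 + PySem.List.pyGetD p i 0)
          else
            (st.1 ++ [st.2], st.2 + PySem.List.pyGetD p i 0))
        ([], PySem.List.pyGetD (a0 :: rest) 0 0)).1
      = pvStarts a0 ((a0 :: rest).zip p) := by
    rw [← List.nil_append (pvStarts a0 ((a0 :: rest).zip p)), ← pvFoldA_fst,
      ← pvMap_range_zip (a0 :: rest) p hlen, List.foldl_map]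
    simp [PySem.List.pyGetD_ofNat']
  rw [hfold]
  have hlenS : (pvStarts a0 ((a0 :: rest).zip p)).length = (a0 :: rest).length := by
    rw [pvStarts_length, List.length_zip]
    omega
  rw [PySem.List.foldl_append_singleton_eq_map]
  apply List.ext_getElem
  · simp [PySem.List.length_pyRange_one, hlenS]
  · intro k h1 h2
    have hk : k < (a0 :: rest).length := by
      simpa [PySem.List.length_pyRange_one] using h1
    have hkS : k < (pvStarts a0 ((a0 :: rest).zip p)).length := by omega
    simp [PySem.List.getElem_pyRange_one, PySem.List.pyGetD_natCast,
      List.getD_eq_getElem?_getD, List.getElem?_eq_getElem hk,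
      List.getElem?_eq_getElem hkS]

theorem pvStarts_getD_zero (t : Int) (x : Int × Int) (l : List (Int × Int)) :
    (pvStarts t (x :: l)).getD 0 0 = max t x.1 := by
  cases x; rfl

theorem pvStarts_getD_succ (l : List (Int × Int)) (t : Int) (i : Nat) (h : i + 1 < l.length) :
    (pvStarts t l).getD (i + 1) 0
      = max ((pvStarts t l).getD i 0 + (l.getD i (0, 0)).2) ((l.getD (i + 1) (0, 0)).1) := by
  induction l generalizing t i with
  | nil => simp at h
  | cons x l ih =>
    cases x with
    | mk xa xp =>
      cases i with
      | zero =>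
        have hl : l ≠ [] := by
          intro hnil; rw [hnil] at h; simp at h
        obtain ⟨y, l', rfl⟩ := List.exists_cons_of_ne_nil hl
        cases y with
        | mk ya yp => simp [pvStarts]
      | succ j =>
        have hj : j + 1 < l.length := by simpa using h
        simpa [pvStarts] using ih (max t xa + xp) j hj

-- B-side: generic scan that the two append-folds (reading list[-1]) compute
def pvScanF (f : Int → Int → Int) (m : Int) : List Int → List Int
  | [] => [m]
  | c :: l => m :: pvScanF f (f m c) l

theorem pvScanF_length (f : Int → Int → Int) (m : Int) (l : List Int) :
    (pvScanF f m l).length = l.length + 1 := by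
  induction l generalizing m with
  | nil => rfl
  | cons c l ih => simp [pvScanF, ih]

theorem pvScanF_getD_zero (f : Int → Int → Int) (m : Int) (l : List Int) :
    (pvScanF f m l).getD 0 0 = m := by
  cases l <;> rfl

theorem pvScanF_getD_succ (f : Int → Int → Int) (l : List Int) (m : Int) (i : Nat)
    (h : i < l.length) :
    (pvScanF f m l).getD (i + 1) 0 = f ((pvScanF f m l).getD i 0) (l.getD i 0) := by
  induction l generalizing m i with
  | nil => simp at h
  | cons c l ih =>
    cases i with
    | zero =>
      simpa [pvScanF] using pvScanF_getD_zero f (f m c) l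
    | succ j =>
      have hj : j < l.length := by simpa using h
      simpa [pvScanF] using ih (f m c) j hj

theorem pvGetD_append_last (acc : List Int) (m : Int) :
    PySem.List.pyGetD (acc ++ [m]) (-1) 0 = m := by
  rw [PySem.List.pyGetD_neg_ofNat (acc ++ [m]) 1 0 (by omega) (by simp)]
  simp

theorem pvFoldLast (f : Int → Int → Int) (l : List Int) : ∀ (acc : List Int) (m : Int),
    l.foldl (fun pk c => pk ++ [f (PySem.List.pyGetD pk (-1) 0) c]) (acc ++ [m])
      = acc ++ pvScanF f m l := by
  induction l with
  | nil => intro acc m; simp [pvScanF]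
  | cons c l ih =>
    intro acc m
    simp only [List.foldl_cons, pvGetD_append_last]
    rw [ih (acc ++ [m]) (f m c)]
    simp [pvScanF]

-- the busy-building fold reads exactly the first n-1 processing times
theorem pvBusy_map (p : List Int) (n : Nat) (h : n ≤ p.length + 1) :
    (PySem.List.pyRange 1 (n : Int) 1).map (fun i => PySem.List.pyGetD p (i - 1) 0)
      = p.take (n - 1) := by
  apply List.ext_getElem
  · simp [PySem.List.length_pyRange_one]; omega
  · intro k h1 h2
    have hk : k < n - 1 := by
      simpa [PySem.List.length_pyRange_one] using h1
    have hkp : k < p.length := by omega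
    simp only [List.getElem_map, PySem.List.getElem_pyRange_one, List.getElem_take]
    have : (1 : Int) + k - 1 = (k : Int) := by omega
    rw [this, PySem.List.pyGetD_natCast]
    simp [List.getD_eq_getElem?_getD, List.getElem?_eq_getElem hkp]

-- B's three intermediate lists, as proof-side definitions
def pvBusyL (a p : List Int) : List Int := pvScanF (· + ·) 0 (p.take (a.length - 1))
def pvSlackL (a p : List Int) : List Int :=
  (List.range a.length).map (fun k => a.getD k 0 - (pvBusyL a p).getD k 0)
def pvPeakL (a p : List Int) : List Int :=
  pvScanF max ((pvSlackL a p).getD 0 0) ((pvSlackL a p).tail)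

theorem pvB_eq_map (a p : List Int) (hne : a ≠ []) (hlen : a.length ≤ p.length) :
    get_programs_time_in_buffer_alt a p
      = (List.range a.length).map
          (fun k => (pvPeakL a p).getD k 0 + (pvBusyL a p).getD k 0 - a.getD k 0) := by
  have hn1 : 1 ≤ a.length := by
    cases a with
    | nil => exact absurd rfl hne
    | cons x l => simp
  unfold get_programs_time_in_buffer_alt
  simp only []
  have hbusy :
      (PySem.List.pyRange 1 (a.length : Int) 1).foldl
        (fun bb i => bb ++ [PySem.List.pyGetD bb (-1) 0 + PySem.List.pyGetD p (i - 1) 0]) [0]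
      = pvBusyL a p := by
    have h0 := pvFoldLast (· + ·) ((PySem.List.pyRange 1 (a.length : Int) 1).map
      (fun i => PySem.List.pyGetD p (i - 1) 0)) [] 0
    rw [List.foldl_map, pvBusy_map p a.length (by omega)] at h0
    simpa [pvBusyL] using h0
  rw [hbusy]
  have hslack :
      (PySem.List.pyRange 0 (a.length : Int) 1).map
        (fun i => PySem.List.pyGetD a i 0 - PySem.List.pyGetD (pvBusyL a p) i 0)
      = pvSlackL a p := by
    rw [PySem.List.pyRange_zero_nat, List.map_map]
    unfold pvSlackL
    apply List.map_congr_left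
    intro k _
    simp [PySem.List.pyGetD_natCast]
  rw [hslack]
  have hsne : pvSlackL a p ≠ [] := by
    unfold pvSlackL
    simp only [ne_eq, List.map_eq_nil_iff, List.range_eq_nil]
    omega
  obtain ⟨s0, st, hs⟩ := List.exists_cons_of_ne_nil hsne
  have hpeak :
      (PySem.List.slice (pvSlackL a p) (some 1) none).foldl
        (fun pk c => pk ++ [max (PySem.List.pyGetD pk (-1) 0) c])
        (PySem.List.slice (pvSlackL a p) none (some 1))
      = pvPeakL a p := by
    rw [PySem.List.slice_from_one,
      show (some (1 : Int)) = some ((1 : Nat) : Int) by norm_num,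
      PySem.List.slice_to_natCast]
    rw [hs]
    simp only [List.tail_cons, List.take_succ_cons, List.take_zero]
    have h2 := pvFoldLast max st [] s0
    simp only [List.nil_append] at h2
    rw [h2]
    unfold pvPeakL
    rw [hs]
    rfl
  rw [hpeak]
  rw [PySem.List.pyRange_zero_nat, List.map_map]
  apply List.map_congr_left
  intro k _
  simp [PySem.List.pyGetD_natCast]

theorem pvZip_getD (a p : List Int) (k : Nat) (hka : k < a.length) (hkp : k < p.length) :
    (a.zip p).getD k (0, 0) = (a.getD k 0, p.getD k 0) := by
  have hkz : k < (a.zip p).length := by rw [List.length_zip]; omega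
  rw [List.getD_eq_getElem _ _ hkz, List.getElem_zip,
    List.getD_eq_getElem _ _ hka, List.getD_eq_getElem _ _ hkp]

theorem get_programs_time_in_buffer_eq (a p : List Int)
    (hne : a ≠ []) (hlen : a.length ≤ p.length) :
    get_programs_time_in_buffer a p = get_programs_time_in_buffer_alt a p := by
  have hn1 : 1 ≤ a.length := by
    cases a with
    | nil => exact absurd rfl hne
    | cons x l => simp
  have hblen : (pvBusyL a p).length = a.length := by
    unfold pvBusyL
    rw [pvScanF_length, List.length_take]
    omega
  have hslen : (pvSlackL a p).length = a.length := by
    unfold pvSlackL; simp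
  have hplen : (pvPeakL a p).length = a.length := by
    unfold pvPeakL
    rw [pvScanF_length, List.length_tail, hslen]
    omega
  have hzlen : (a.zip p).length = a.length := by rw [List.length_zip]; omega
  have hstlen : (pvStarts a.headI (a.zip p)).length = a.length := by
    rw [pvStarts_length, hzlen]
  -- getD recurrences of B's lists
  have hbusy0 : (pvBusyL a p).getD 0 0 = 0 := pvScanF_getD_zero _ _ _
  have hbusyS : ∀ j, j + 1 < a.length →
      (pvBusyL a p).getD (j + 1) 0 = (pvBusyL a p).getD j 0 + p.getD j 0 := by
    intro j hj
    unfold pvBusyL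
    rw [pvScanF_getD_succ (· + ·) (p.take (a.length - 1)) 0 j
      (by rw [List.length_take]; omega)]
    congr 1
    rw [List.getD_eq_getElem?_getD, List.getD_eq_getElem?_getD, List.getElem?_take]
    rw [if_pos (by omega)]
  have hslackk : ∀ k, k < a.length →
      (pvSlackL a p).getD k 0 = a.getD k 0 - (pvBusyL a p).getD k 0 := by
    intro k hk
    unfold pvSlackL
    rw [List.getD_eq_getElem?_getD, List.getElem?_map, List.getElem?_range hk]
    rfl
  have hpeak0 : (pvPeakL a p).getD 0 0 = (pvSlackL a p).getD 0 0 := pvScanF_getD_zero _ _ _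
  have hpeakS : ∀ j, j + 1 < a.length →
      (pvPeakL a p).getD (j + 1) 0
        = max ((pvPeakL a p).getD j 0) ((pvSlackL a p).getD (j + 1) 0) := by
    intro j hj
    unfold pvPeakL
    rw [pvScanF_getD_succ max (pvSlackL a p).tail _ j (by rw [List.length_tail, hslen]; omega)]
    congr 1
    obtain ⟨s0, st, hs⟩ := List.exists_cons_of_ne_nil
      (show pvSlackL a p ≠ [] by intro hx; rw [hx] at hslen; simp at hslen; omega)
    rw [hs]
    rfl
  -- key invariant: peak[i] + busy[i] = starts[i]
  have key : ∀ i, i < a.length →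
      (pvPeakL a p).getD i 0 + (pvBusyL a p).getD i 0
        = (pvStarts a.headI (a.zip p)).getD i 0 := by
    intro i
    induction i with
    | zero =>
      intro _
      obtain ⟨a0, at', rfl⟩ := List.exists_cons_of_ne_nil hne
      obtain ⟨p0, pt, rfl⟩ := List.exists_cons_of_ne_nil
        (show p ≠ [] by intro hx; rw [hx] at hlen; simp at hlen)
      rw [hpeak0, hbusy0, hslackk 0 (by simp)]
      rw [hbusy0]
      simp only [List.zip_cons_cons, List.headI_cons]
      rw [pvStarts_getD_zero]
      simp [List.getD]
    | succ j ih =>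
      intro hj
      have hj' : j < a.length := by omega
      have hstS := pvStarts_getD_succ (a.zip p) a.headI j (by omega)
      rw [pvZip_getD a p j hj' (by omega), pvZip_getD a p (j + 1) hj (by omega)] at hstS
      rw [hstS, ← ih hj', hpeakS j hj, hslackk (j + 1) hj, hbusyS j hj]
      omega
  -- conclude elementwise
  rw [pvA_eq_zipWith a p hne hlen, pvB_eq_map a p hne hlen]
  apply List.ext_getElem
  · simp [hstlen]
  · intro k h1 h2
    have hk : k < a.length := by
      simpa [hstlen] using h1
    rw [List.getElem_zipWith, List.getElem_map, List.getElem_range]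
    rw [← List.getD_eq_getElem (pvStarts a.headI (a.zip p)) 0 (by omega),
      ← List.getD_eq_getElem a 0 (by omega)]
    rw [← key k hk]

-- ===== VERDICT (by name: the statement is the Claim_ definition above) =====
theorem get_programs_time_in_buffer_spec : Claim_equal_get_programs_time_in_buffer := by
  intro a p _ hpre
  exact get_programs_time_in_buffer_eq a p hpre.1 hpre.2
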